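-- pv_equiv track=rewrite | github.com/0lu/codingpractice | Algorithms/n_choose_k.py | perm_without_repetitions
-- ===== SOURCE A (Python) =====
-- import copy
--
-- def perm_without_repetitions(arr, num):
--     def perm_helper(arr, index, num, map, curr, result):
--         if num == 0:
--             result.append(copy.deepcopy(curr))
--             return
--
--         for i in range(len(arr)):
--             if not map[i]:
--                 curr.append(arr[i])
--                 map[i] = True
--                 perm_helper(arr, i, num - 1, map, curr, result)
--                 curr.pop()
--                 map[i] = False
--
--     map = [False for _ in arr]
--     result = []
--     perm_helper(arr, 0, num, map, [], result)
--     return result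
-- ===== SOURCE B (Python) =====
-- import itertools
-- import copy
--
-- def perm_without_repetitions(arr, num):
--     if num < 0 or num > len(arr):
--         return []
--     return [copy.deepcopy(list(p)) for p in itertools.permutations(arr, num)]
-- ===== Notes on version B (the rewrite author's own statement) =====
-- stated objective: idiomatic
-- what changed: Replaces the hand-written backtracking with a used-index map by itertools.permutations (which yields tuples in the same index-lexicographic order), guarding num < 0 and num > len(arr) to return [] as A does.
import Mathlib
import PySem

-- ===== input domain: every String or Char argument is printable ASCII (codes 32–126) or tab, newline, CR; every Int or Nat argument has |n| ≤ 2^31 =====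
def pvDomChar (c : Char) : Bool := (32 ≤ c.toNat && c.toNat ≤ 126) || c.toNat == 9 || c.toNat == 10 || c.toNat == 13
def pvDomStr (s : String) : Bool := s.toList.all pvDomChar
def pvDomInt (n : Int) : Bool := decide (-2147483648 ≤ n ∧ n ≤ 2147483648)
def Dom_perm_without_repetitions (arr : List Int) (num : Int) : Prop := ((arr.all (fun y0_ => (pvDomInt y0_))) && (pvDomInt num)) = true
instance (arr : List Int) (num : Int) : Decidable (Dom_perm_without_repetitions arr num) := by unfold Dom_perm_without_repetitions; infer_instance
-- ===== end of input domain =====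

-- B replaces A's hand-written backtracking (used-index map + recursion) by the
-- itertools.permutations enumeration (same index-lexicographic order); equivalence is about the return value.


-- ===== PORT A =====
-- inner `for i in range(len(arr))` loop of perm_helper: js is the remaining index list,
-- `map` is the used-flags list (restored after each recursive call, so passed unchanged).
-- `fuel` is a pure totality guard (recursion depth is bounded by the number of free flags).
mutual
def permHelperA (arr : List Int) (fuel : Nat) (num : Int) (map : List Bool)
    (curr : List Int) (result : List (List Int)) : List (List Int) :=
  match fuel with
  | 0 => result
  | f + 1 =>
    if num = 0 then result ++ [curr]
    else permLoopA arr f num map curr (List.range arr.length) result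
termination_by (fuel, 0)

def permLoopA (arr : List Int) (f : Nat) (num : Int) (map : List Bool)
    (curr : List Int) (js : List Nat) (result : List (List Int)) : List (List Int) :=
  match js with
  | [] => result
  | i :: js' =>
    if map.getD i true = false then
      permLoopA arr f num map curr js'
        (permHelperA arr f (num - 1) (map.set i true) (curr ++ [arr.getD i 0]) result)
    else
      permLoopA arr f num map curr js' result
termination_by (f, js.length + 1)
end

def perm_without_repetitions (arr : List Int) (num : Int) : List (List Int) :=
  permHelperA arr (arr.length + 1) num (arr.map (fun _ => false)) [] []

-- ===== PORT B =====
-- port of itertools.permutations(arr, num): pick each element (with its index) in order,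
-- recurse on the remaining list; index-lexicographic order.
def selectionsB (l : List Int) : List (Int × List Int) :=
  match l with
  | [] => []
  | x :: xs => (x, xs) :: (selectionsB xs).map (fun p => (p.1, x :: p.2))

def permsB : Nat → List Int → List (List Int)
  | 0, _ => [[]]
  | k + 1, l => (selectionsB l).flatMap (fun p => (permsB k p.2).map (p.1 :: ·))

def perm_without_repetitions_alt (arr : List Int) (num : Int) : List (List Int) :=
  if num < 0 ∨ (arr.length : Int) < num then [] else permsB num.toNat arr

-- ===== PRECONDITION & SPEC =====
def Spec_perm_without_repetitions (arr : List Int) (num : Int) (out : List (List Int)) : Prop := out = perm_without_repetitions_alt arr num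
instance (arr : List Int) (num : Int) (out : List (List Int)) : Decidable (Spec_perm_without_repetitions arr num out) := by unfold Spec_perm_without_repetitions; infer_instance

-- ===== CLAIM (what is proved, stated in full; the proofs are below) =====
def Claim_equal_perm_without_repetitions : Prop := ∀ (arr : List Int) (num : Int), Dom_perm_without_repetitions arr num → Spec_perm_without_repetitions arr num (perm_without_repetitions arr num)

-- ===== LEMMAS AND PROOFS =====

-- the elements of `arr` whose flag in `map` is still false, in order
def freeL : List Int → List Bool → List Int
  | x :: xs, b :: bs => if b then freeL xs bs else x :: freeL xs bs
  | _, _ => []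

-- the value A's helper appends to `result`
def outA (num : Int) (l : List Int) (curr : List Int) : List (List Int) :=
  if num < 0 then [] else (permsB num.toNat l).map (curr ++ ·)

lemma freeL_all_false (arr : List Int) : freeL arr (List.replicate arr.length false) = arr := by
  induction arr with
  | nil => rfl
  | cons x xs ih => simp [List.replicate, freeL, ih]

lemma freeL_take_succ (i : Nat) : ∀ (arr : List Int) (map : List Bool),
    map.length = arr.length → i < arr.length →
    freeL (arr.take (i + 1)) (map.take (i + 1)) =
      freeL (arr.take i) (map.take i) ++
        (if map.getD i true then [] else [arr.getD i 0]) := by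
  induction i with
  | zero =>
    intro arr map hlen hi
    match arr, map with
    | x :: xs, b :: bs => cases b <;> simp [freeL]
  | succ n ih =>
    intro arr map hlen hi
    match arr, map with
    | x :: xs, b :: bs =>
      simp only [List.take_succ_cons, List.length_cons] at *
      cases b <;> simp [freeL, ih xs bs (by omega) (by omega)]

lemma freeL_set (i : Nat) : ∀ (arr : List Int) (map : List Bool),
    map.length = arr.length → i < arr.length →
    freeL arr (map.set i true) =
      freeL (arr.take i) (map.take i) ++ freeL (arr.drop (i + 1)) (map.drop (i + 1)) := by
  induction i with
  | zero =>
    intro arr map hlen hi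
    match arr, map with
    | x :: xs, b :: bs => simp [freeL]
  | succ n ih =>
    intro arr map hlen hi
    match arr, map with
    | x :: xs, b :: bs =>
      simp only [List.length_cons] at *
      cases b <;> simp [freeL, List.set, ih xs bs (by omega) (by omega)]

lemma freeL_drop_cons (i : Nat) (arr : List Int) (map : List Bool)
    (hlen : map.length = arr.length) (hi : i < arr.length) :
    freeL (arr.drop i) (map.drop i) =
      (if map.getD i true then [] else [arr.getD i 0]) ++
        freeL (arr.drop (i + 1)) (map.drop (i + 1)) := by
  rw [List.drop_eq_getElem_cons hi, List.drop_eq_getElem_cons (by omega : i < map.length)]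
  rcases hb : map[i] with _ | _ <;>
    simp [freeL, hi, (by omega : i < map.length), hb]

lemma count_false_set (i : Nat) : ∀ (map : List Bool), i < map.length →
    map.getD i true = false →
    (map.set i true).count false + 1 = map.count false := by
  induction i with
  | zero =>
    intro map hi hget
    match map with
    | b :: bs =>
      simp only [List.getD_cons_zero] at hget
      subst hget
      simp
  | succ n ih =>
    intro map hi hget
    match map with
    | b :: bs =>
      simp only [List.length_cons] at hi
      simp only [List.getD_cons_succ] at hget
      simp only [List.set_cons_succ, List.count_cons]
      have := ih bs (by omega) hget
      omega

lemma selectionsB_snd_length : ∀ (l : List Int) (p : Int × List Int),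
    p ∈ selectionsB l → p.2.length + 1 = l.length := by
  intro l
  induction l with
  | nil => simp [selectionsB]
  | cons x xs ih =>
    intro p hp
    simp only [selectionsB, List.mem_cons, List.mem_map] at hp
    rcases hp with h | ⟨q, hq, hqp⟩
    · subst h; simp
    · have := ih q hq
      subst hqp
      simp only [List.length_cons]
      omega

lemma permsB_of_short : ∀ (k : Nat) (l : List Int), l.length < k → permsB k l = [] := by
  intro k
  induction k with
  | zero => intro l h; omega
  | succ n ih =>
    intro l h
    rw [permsB, List.flatMap_eq_nil_iff]
    intro p hp
    have hlen := selectionsB_snd_length l p hp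
    rw [ih p.2 (by omega)]
    simp

lemma outA_neg {num : Int} (h : num < 0) (l curr : List Int) : outA num l curr = [] := by
  simp [outA, h]

-- the inner loop, run from index i, appends the selections of the free suffix
lemma permLoopA_spec (arr : List Int) (f : Nat) (num : Int)
    (IH : ∀ (num : Int) (map : List Bool) (curr : List Int) (result : List (List Int)),
      map.length = arr.length → map.count false < f →
      permHelperA arr f num map curr result = result ++ outA num (freeL arr map) curr) :
    ∀ (k i : Nat) (map : List Bool) (curr : List Int) (result : List (List Int)),
      i + k = arr.length → map.length = arr.length → map.count false ≤ f →
      permLoopA arr f num map curr (List.range' i k) result =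
        result ++ (selectionsB (freeL (arr.drop i) (map.drop i))).flatMap
          (fun p => outA (num - 1) (freeL (arr.take i) (map.take i) ++ p.2) (curr ++ [p.1])) := by
  intro k
  induction k with
  | zero =>
    intro i map curr result hik hlen hcnt
    have : arr.drop i = [] := by rw [List.drop_eq_nil_iff]; omega
    have hm : map.drop i = [] := by rw [List.drop_eq_nil_iff]; omega
    simp [permLoopA, this, hm, freeL, selectionsB]
  | succ k ih =>
    intro i map curr result hik hlen hcnt
    have hi : i < arr.length := by omega
    have him : i < map.length := by omega
    rw [List.range'_succ]
    rcases hb : map.getD i true with _ | _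
    · -- free index: one recursive call, then the rest of the loop
      have hcnt1 : 1 ≤ map.count false := by
        have := count_false_set i map him hb; omega
      have hrec := IH (num - 1) (map.set i true) (curr ++ [arr.getD i 0]) result
        (by simpa using hlen)
        (by have := count_false_set i map him hb; omega)
      rw [permLoopA, if_pos hb, hrec,
        ih (i + 1) map curr _ (by omega) hlen hcnt,
        freeL_set i arr map hlen hi,
        freeL_drop_cons i arr map hlen hi, hb,
        freeL_take_succ i arr map hlen hi, hb]
      simp [selectionsB, List.flatMap_cons, List.flatMap_map]
    · -- used index: skip
      rw [permLoopA, if_neg (by rw [hb]; simp),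
        ih (i + 1) map curr result (by omega) hlen hcnt,
        freeL_drop_cons i arr map hlen hi, hb,
        freeL_take_succ i arr map hlen hi, hb]
      simp

lemma permHelperA_spec (arr : List Int) :
    ∀ (fuel : Nat) (num : Int) (map : List Bool) (curr : List Int) (result : List (List Int)),
      map.length = arr.length → map.count false < fuel →
      permHelperA arr fuel num map curr result = result ++ outA num (freeL arr map) curr := by
  intro fuel
  induction fuel with
  | zero => intro _ _ _ _ _ hcnt; omega
  | succ f ihf =>
    intro num map curr result hlen hcnt
    rw [permHelperA]
    by_cases h0 : num = 0
    · subst h0; simp [outA, permsB]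
    · rw [if_neg h0, List.range_eq_range',
        permLoopA_spec arr f num (fun n m c r h1 h2 => ihf n m c r h1 h2)
          arr.length 0 map curr result (by omega) hlen (by omega)]
      by_cases hneg : num < 0
      · simp [outA_neg hneg, outA_neg (by omega : num - 1 < 0)]
      · -- num ≥ 1
        have h1 : (1 : Int) ≤ num := by omega
        have htn : num.toNat = (num - 1).toNat + 1 := by omega
        simp only [List.take_zero, List.drop_zero, freeL, List.nil_append]
        rw [outA, if_neg hneg, htn, permsB, List.map_flatMap]
        have hfun : (fun p => outA (num - 1) p.2 (curr ++ [p.1])) =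
            (fun p : Int × List Int =>
              ((permsB (num - 1).toNat p.2).map (p.1 :: ·)).map (curr ++ ·)) := by
          funext p
          rw [outA, if_neg (by omega : ¬ num - 1 < 0), List.map_map]
          have hg : (fun x => (curr ++ [p.1]) ++ x) =
              ((fun x => curr ++ x) ∘ (fun x => p.1 :: x)) := by
            funext t
            simp
          rw [hg]
        rw [hfun]

-- ===== VERDICT (by name: the statement is the Claim_ definition above) =====
theorem perm_without_repetitions_spec : Claim_equal_perm_without_repetitions := by
  intro arr num _
  unfold Spec_perm_without_repetitions perm_without_repetitions perm_without_repetitions_alt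
  have hmap : arr.map (fun _ => false) = List.replicate arr.length false := by
    simp
  rw [hmap, permHelperA_spec arr (arr.length + 1) num (List.replicate arr.length false) [] []
      (by simp) (by simp)]
  rw [freeL_all_false]
  by_cases hneg : num < 0
  · simp [outA_neg hneg, hneg]
  · by_cases hbig : (arr.length : Int) < num
    · rw [if_pos (Or.inr hbig), outA, if_neg hneg,
        permsB_of_short num.toNat arr (by omega)]
      simp
    · rw [if_neg (by simp only [not_or, not_lt]; exact ⟨le_of_not_gt hneg, le_of_not_gt hbig⟩)]
      simp [outA, hneg]
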